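-- pv_equiv track=rewrite | github.com/umutsoyyilmaz/SAP_Transformation_Platform | app/services/testing/analytics.py | _release_readiness_status
-- ===== SOURCE A (Python) =====
-- def _release_readiness_status(reasons):
--     """Map ordered blocker reasons to a stable readiness label."""
--     if not reasons:
--         return "ready_now"
--     priority = (
--         "missing_metadata",
--         "execution_incomplete",
--         "blocked_by_defects",
--         "awaiting_approval",
--         "awaiting_signoff",
--         "missing_evidence",
--     )
--     for reason in priority:
--         if reason in reasons:
--             return reason
--     return reasons[0]
-- ===== SOURCE B (Python) =====
-- _PRIORITY = (
--     "missing_metadata",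
--     "execution_incomplete",
--     "blocked_by_defects",
--     "awaiting_approval",
--     "awaiting_signoff",
--     "missing_evidence",
-- )
-- _RANK = {r: i for i, r in enumerate(_PRIORITY)}
--
--
-- def _release_readiness_status(reasons):
--     """Map ordered blocker reasons to a stable readiness label."""
--     if not reasons:
--         return "ready_now"
--     best = min((_RANK[r] for r in reasons if r in _RANK), default=None)
--     return _PRIORITY[best] if best is not None else reasons[0]
-- ===== Notes on version B (the rewrite author's own statement) =====
-- stated objective: idiomatic
-- what changed: Instead of scanning the fixed priority tuple and testing membership in reasons for each entry, B builds a rank index once and makes a single pass over reasons taking the minimal rank, returning priority[min_rank] (or reasons[0] if no reason is ranked).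
import Mathlib
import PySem

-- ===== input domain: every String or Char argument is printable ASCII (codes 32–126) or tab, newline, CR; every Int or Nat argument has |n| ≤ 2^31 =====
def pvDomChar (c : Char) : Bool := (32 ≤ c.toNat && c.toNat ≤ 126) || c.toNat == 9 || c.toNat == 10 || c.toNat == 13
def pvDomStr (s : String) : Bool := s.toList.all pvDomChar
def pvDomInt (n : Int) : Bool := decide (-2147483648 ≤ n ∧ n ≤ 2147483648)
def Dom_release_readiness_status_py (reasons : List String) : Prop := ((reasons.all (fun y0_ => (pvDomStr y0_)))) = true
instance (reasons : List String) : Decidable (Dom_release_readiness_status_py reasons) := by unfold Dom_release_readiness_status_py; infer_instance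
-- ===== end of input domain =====

-- B replaces A's scan of the fixed priority tuple (membership test in reasons per entry)
-- by a rank index and a single min-of-ranks pass over reasons; objective: idiomatic.

-- the fixed priority tuple
def pvPrio : List String :=
  ["missing_metadata", "execution_incomplete", "blocked_by_defects",
   "awaiting_approval", "awaiting_signoff", "missing_evidence"]

-- ===== PORT A =====
-- 'for reason in priority: if reason in reasons: return reason'
def pvScanPrio : List String → List String → Option String
  | [], _ => none
  | p :: rest, reasons => if reasons.contains p then some p else pvScanPrio rest reasons

def release_readiness_status_py (reasons : List String) : String :=
  if reasons.isEmpty then "ready_now"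
  else
    match pvScanPrio pvPrio reasons with
    | some p => p
    | none => (PySem.List.pyGet? reasons 0).getD ""   -- reasons[0]; in range: reasons ≠ []

-- ===== PORT B =====
-- rank = {r: i for i, r in enumerate(priority)}
def pvRank : PySem.Dict String Int :=
  (PySem.List.enumerate pvPrio 0).foldl (fun d ir => d.insert ir.2 ir.1) PySem.Dict.empty

def release_readiness_status_py_alt (reasons : List String) : String :=
  if reasons.isEmpty then "ready_now"
  else
    -- best = min((rank[r] for r in reasons if r in rank), default=None)
    match PySem.List.min? (reasons.filterMap (fun r => pvRank.get? r)) (fun x => x) with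
    | some b => (PySem.List.pyGet? pvPrio b).getD ""  -- priority[best]; in range: 0 ≤ b < 6
    | none => (PySem.List.pyGet? reasons 0).getD ""   -- reasons[0]

-- ===== PRECONDITION & SPEC =====
def Spec_release_readiness_status_py (reasons : List String) (out : String) : Prop := out = release_readiness_status_py_alt reasons
instance (reasons : List String) (out : String) : Decidable (Spec_release_readiness_status_py reasons out) := by unfold Spec_release_readiness_status_py; infer_instance

-- ===== CLAIM (what is proved, stated in full; the proofs are below) =====
def Claim_equal_release_readiness_status_py : Prop := ∀ (reasons : List String), Dom_release_readiness_status_py reasons → Spec_release_readiness_status_py reasons (release_readiness_status_py reasons)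

-- ===== LEMMAS AND PROOFS =====

-- positional first-match lookup with an explicit offset: pvIdx P i s = index of s in P, offset by i
def pvIdx : List String → Int → String → Option Int
  | [], _, _ => none
  | p :: rest, i, s => if p == s then some i else pvIdx rest (i + 1) s

theorem pvRank_get? (s : String) : pvRank.get? s = pvIdx pvPrio 0 s := by
  have h : pvRank = PySem.Dict.mk
      [("missing_metadata", 0), ("execution_incomplete", 1), ("blocked_by_defects", 2),
       ("awaiting_approval", 3), ("awaiting_signoff", 4), ("missing_evidence", 5)] := by decide
  rw [h]
  simp only [PySem.Dict.get?_mk_cons, pvIdx, pvPrio]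
  norm_num
  rfl

theorem pvIdx_ge {P : List String} {i v : Int} {s : String} (h : pvIdx P i s = some v) : i ≤ v := by
  induction P generalizing i with
  | nil => simp [pvIdx] at h
  | cons p rest ih =>
    simp only [pvIdx] at h
    split at h
    · simp at h; omega
    · have := ih h; omega

theorem pvIdx_lt {P : List String} {i v : Int} {s : String} (h : pvIdx P i s = some v) :
    v < i + P.length := by
  induction P generalizing i with
  | nil => simp [pvIdx] at h
  | cons p rest ih =>
    simp only [pvIdx] at h
    split at h
    · simp at h; simp; omega
    · have := ih h; simp; omega

theorem pyGet?_cons_add_one {x : String} {xs : List String} {j : Int} (hj : 0 ≤ j) :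
    PySem.List.pyGet? (x :: xs) (j + 1) = PySem.List.pyGet? xs j := by
  obtain ⟨n, rfl⟩ := Int.eq_ofNat_of_zero_le hj
  exact PySem.List.pyGet?_cons_succ x xs n

theorem min?_eq_of_mem_of_le {l : List Int} {i : Int} (hmem : i ∈ l)
    (hle : ∀ x ∈ l, i ≤ x) : PySem.List.min? l (fun x => x) = some i := by
  cases h : PySem.List.min? l (fun x => x) with
  | none =>
    rw [PySem.List.min?_eq_none_iff] at h
    subst h; simp at hmem
  | some m =>
    have hm : m ∈ l := PySem.List.min?_mem h
    have h1 : i ≤ m := hle m hm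
    have h2 : m ≤ i := by simpa using PySem.List.min?_isMin h i hmem
    have : m = i := le_antisymm h2 h1
    rw [this]

theorem pvMain (P : List String) (i : Int) (reasons : List String) :
    (match PySem.List.min? (reasons.filterMap (fun r => pvIdx P i r)) (fun x => x) with
     | some b => PySem.List.pyGet? P (b - i)
     | none => (none : Option String)) = pvScanPrio P reasons := by
  induction P generalizing i with
  | nil =>
    have h0 : reasons.filterMap (fun r => pvIdx ([] : List String) i r) = [] := by
      simp [pvIdx]
    rw [h0, (PySem.List.min?_eq_none_iff _ _).mpr rfl]
    simp [pvScanPrio]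
  | cons p rest ih =>
    by_cases hc : reasons.contains p
    · have hmem : i ∈ reasons.filterMap (fun r => pvIdx (p :: rest) i r) := by
        rw [List.mem_filterMap]
        exact ⟨p, by simpa using hc, by simp [pvIdx]⟩
      have hle : ∀ x ∈ reasons.filterMap (fun r => pvIdx (p :: rest) i r), i ≤ x := by
        intro x hx
        rw [List.mem_filterMap] at hx
        obtain ⟨r, _, hr⟩ := hx
        simp only [pvIdx] at hr
        split at hr
        · simp at hr; omega
        · have := pvIdx_ge hr; omega
      rw [min?_eq_of_mem_of_le hmem hle]
      show PySem.List.pyGet? (p :: rest) (i - i) = _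
      have h0 : i - i = (0 : Int) := by ring
      rw [h0, PySem.List.pyGet?_zero_cons]
      simp only [pvScanPrio]
      rw [if_pos hc]
    · have hfm : reasons.filterMap (fun r => pvIdx (p :: rest) i r)
          = reasons.filterMap (fun r => pvIdx rest (i + 1) r) := by
        apply List.filterMap_congr
        intro r hr
        have hne : ¬ (p == r) = true := by
          intro h
          have hpr : p = r := by simpa using h
          subst hpr
          exact hc (by simpa using hr)
        simp only [pvIdx]
        rw [if_neg hne]
      rw [hfm]
      have hih := ih (i + 1)
      cases h : PySem.List.min? (reasons.filterMap (fun r => pvIdx rest (i + 1) r)) (fun x => x) with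
      | none =>
        rw [h] at hih
        simp only [pvScanPrio]
        rw [if_neg hc]
        exact hih
      | some b =>
        rw [h] at hih
        have hb : i + 1 ≤ b := by
          have hm : b ∈ reasons.filterMap (fun r => pvIdx rest (i + 1) r) := PySem.List.min?_mem h
          rw [List.mem_filterMap] at hm
          obtain ⟨r, _, hr⟩ := hm
          exact pvIdx_ge hr
        show PySem.List.pyGet? (p :: rest) (b - i) = _
        have heq : b - i = (b - (i + 1)) + 1 := by omega
        rw [heq, pyGet?_cons_add_one (by omega)]
        simp only [pvScanPrio]
        rw [if_neg hc]
        exact hih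

-- ===== VERDICT (by name: the statement is the Claim_ definition above) =====
theorem release_readiness_status_py_spec : Claim_equal_release_readiness_status_py := by
  intro reasons _
  unfold Spec_release_readiness_status_py release_readiness_status_py release_readiness_status_py_alt
  by_cases he : reasons.isEmpty
  · simp [he]
  · simp only [he]
    have hfm : reasons.filterMap (fun r => pvRank.get? r)
        = reasons.filterMap (fun r => pvIdx pvPrio 0 r) := by
      apply List.filterMap_congr
      intro r _
      exact pvRank_get? r
    rw [hfm]
    have hmain := pvMain pvPrio 0 reasons
    cases h : PySem.List.min? (reasons.filterMap (fun r => pvIdx pvPrio 0 r)) (fun x => x) with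
    | none =>
      rw [h] at hmain
      rw [← hmain]
    | some b =>
      rw [h] at hmain
      simp only [sub_zero] at hmain
      have hm : b ∈ reasons.filterMap (fun r => pvIdx pvPrio 0 r) := PySem.List.min?_mem h
      rw [List.mem_filterMap] at hm
      obtain ⟨r, _, hr⟩ := hm
      have h1 : (0 : Int) ≤ b := pvIdx_ge hr
      have h2 : b < 6 := by
        have := pvIdx_lt hr
        simpa [pvPrio] using this
      obtain ⟨p, hp⟩ : ∃ p, PySem.List.pyGet? pvPrio b = some p := by
        interval_cases b <;> exact ⟨_, rfl⟩
      rw [← hmain, hp]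
      simp [hp]
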